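-- pv_equiv track=rewrite | github.com/lachmed/OptimServer | src/VNSLatestVersionProblem2.py | calculerFonctionObjective
-- ===== SOURCE A (Python) =====
-- def calculerFonctionObjective(x, data):
--     # On va calculer la fonction objective pour une séquence
--     # inistialisations
--     finnished = 0
--     T = 0
--     E = 0
--
--     res = 0
--
-- # pour chaque tache i on ajoute son pi (processing time) au temp
-- # de fin des tache qui la précède dans la séquance pour avoir ci (temp de fin)
-- # et si ce ci > di (due date) alors on incrémente le compteur des taches en retard
-- # sinon rien faire
--
--     for i in range(len(x)):
--
--         finnished += data[x[i]][0]
--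
--         if finnished > data[x[i]][1]:
--             T = finnished-data[x[i]][1]
--             E = 0
--         elif finnished == data[x[i]][1]:
--             T = 0
--             E = 0
--         else:
--             T = 0
--             E = data[x[i]][1]-finnished
--
--         res += (data[x[i]][2] * E) + (data[x[i]][3] * T)
--
--     return res
-- ===== SOURCE B (Python) =====
-- def calculerFonctionObjective(x, data):
--     # Backward pass: the completion time of the LAST job is the total processing
--     # time; walking the sequence in reverse, each earlier job's completion time
--     # is recovered by subtracting the processing time of the job after it.
--     c = sum(data[j][0] for j in x)
--     res = 0
--     for j in reversed(x):
--         d = data[j][1]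
--         res += data[j][2] * (d - c) if c < d else data[j][3] * (c - d)
--         c -= data[j][0]
--     return res
-- ===== Notes on version B (the rewrite author's own statement) =====
-- stated objective: alternative
-- what changed: B traverses the sequence in reverse: it computes the total processing time once, then walks the jobs back-to-front, recovering each completion time by subtraction instead of A's forward accumulation with branch-assigned T/E registers.
import Mathlib
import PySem

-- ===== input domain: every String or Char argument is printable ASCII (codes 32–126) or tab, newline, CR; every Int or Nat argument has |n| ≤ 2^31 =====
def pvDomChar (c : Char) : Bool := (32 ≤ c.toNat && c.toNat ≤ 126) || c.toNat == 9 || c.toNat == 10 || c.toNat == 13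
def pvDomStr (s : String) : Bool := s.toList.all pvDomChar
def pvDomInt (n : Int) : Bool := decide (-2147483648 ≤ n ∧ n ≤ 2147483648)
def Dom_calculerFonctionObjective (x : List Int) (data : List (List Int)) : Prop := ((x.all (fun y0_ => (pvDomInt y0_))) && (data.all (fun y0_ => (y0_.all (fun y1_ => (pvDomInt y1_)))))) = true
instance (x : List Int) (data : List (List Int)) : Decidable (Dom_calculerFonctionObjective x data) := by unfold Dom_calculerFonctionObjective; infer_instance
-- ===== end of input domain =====

-- B computes the same earliness/tardiness cost by a backward pass: total processing
-- time first, then completion times recovered by subtraction while walking x reversed.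

-- ===== PORT A =====
-- one iteration of A's loop body over the state (finnished, res); T/E set in every branch
def pvStepA (data : List (List Int)) (st : Int × Int) (xi : Int) : Int × Int :=
  let row := PySem.List.pyGetD data xi []
  let finnished := st.1 + PySem.List.pyGetD row 0 0
  let TE : Int × Int :=
    if finnished > PySem.List.pyGetD row 1 0 then (finnished - PySem.List.pyGetD row 1 0, 0)
    else if finnished == PySem.List.pyGetD row 1 0 then (0, 0)
    else (0, PySem.List.pyGetD row 1 0 - finnished)
  (finnished, st.2 + (PySem.List.pyGetD row 2 0 * TE.2 + PySem.List.pyGetD row 3 0 * TE.1))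

def calculerFonctionObjective (x : List Int) (data : List (List Int)) : Int :=
  ((PySem.List.pyRange 0 (x.length : Int) 1).foldl
    (fun st i => pvStepA data st (PySem.List.pyGetD x i 0)) (0, 0)).2

-- ===== PORT B =====
-- one iteration of B's reversed loop over the state (c, res)
def pvStepB (data : List (List Int)) (st : Int × Int) (j : Int) : Int × Int :=
  let row := PySem.List.pyGetD data j []
  let d := PySem.List.pyGetD row 1 0
  let res := st.2 + (if st.1 < d then PySem.List.pyGetD row 2 0 * (d - st.1)
                     else PySem.List.pyGetD row 3 0 * (st.1 - d))
  (st.1 - PySem.List.pyGetD row 0 0, res)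

def calculerFonctionObjective_alt (x : List Int) (data : List (List Int)) : Int :=
  let total := (x.map (fun j => PySem.List.pyGetD (PySem.List.pyGetD data j []) 0 0)).sum
  (x.reverse.foldl (pvStepB data) (total, 0)).2

-- ===== PRECONDITION & SPEC =====
-- Pre_ excludes exactly the inputs on which A raises (IndexError: a job index out of
-- range for data, or a data row with fewer than 4 fields).
def Pre_calculerFonctionObjective (x : List Int) (data : List (List Int)) : Prop :=
  (x.all (fun j => match PySem.List.pyGet? data j with
                   | some row => decide (4 ≤ row.length)
                   | none => false)) = true
instance (x : List Int) (data : List (List Int)) : Decidable (Pre_calculerFonctionObjective x data) := by unfold Pre_calculerFonctionObjective; infer_instance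
def pvWitness_calculerFonctionObjective : List Int × List (List Int) := ([0, 1, 0], [[3, 5, 2, 7], [2, 4, 1, 1]])

def Spec_calculerFonctionObjective (x : List Int) (data : List (List Int)) (out : Int) : Prop := out = calculerFonctionObjective_alt x data
instance (x : List Int) (data : List (List Int)) (out : Int) : Decidable (Spec_calculerFonctionObjective x data out) := by unfold Spec_calculerFonctionObjective; infer_instance

-- ===== CLAIM (what is proved, stated in full; the proofs are below) =====
def Claim_equal_calculerFonctionObjective : Prop := ∀ (x : List Int) (data : List (List Int)), Dom_calculerFonctionObjective x data → Pre_calculerFonctionObjective x data → Spec_calculerFonctionObjective x data (calculerFonctionObjective x data)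

-- ===== LEMMAS AND PROOFS =====

-- processing time of job j
def pvP (data : List (List Int)) (j : Int) : Int :=
  PySem.List.pyGetD (PySem.List.pyGetD data j []) 0 0

-- the earliness/tardiness penalty of job j completed at time c
def pvTerm (data : List (List Int)) (j c : Int) : Int :=
  let row := PySem.List.pyGetD data j []
  let d := PySem.List.pyGetD row 1 0
  if c < d then PySem.List.pyGetD row 2 0 * (d - c)
  else PySem.List.pyGetD row 3 0 * (c - d)

-- the cost of a job list started at elapsed time t (reference recursion)
def pvCost (data : List (List Int)) : List Int -> Int -> Int
  | [], _ => 0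
  | j :: rest, t => pvTerm data j (t + pvP data j) + pvCost data rest (t + pvP data j)

lemma pvStepA_eq (data : List (List Int)) (t acc j : Int) :
    pvStepA data (t, acc) j = (t + pvP data j, acc + pvTerm data j (t + pvP data j)) := by
  unfold pvStepA pvTerm pvP
  simp only []
  set row := PySem.List.pyGetD data j [] with hrow
  set c := t + PySem.List.pyGetD row 0 0 with hc
  set d := PySem.List.pyGetD row 1 0 with hd
  by_cases h1 : c > d
  · rw [if_pos h1, if_neg (by omega)]
    simp
  · rw [if_neg h1]
    by_cases h2 : c = d
    · rw [if_pos (by simpa using h2), if_neg (by omega)]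
      simp [h2]
    · rw [if_neg (by simpa using h2), if_pos (by omega)]
      simp

lemma pvStepB_eq (data : List (List Int)) (c res j : Int) :
    pvStepB data (c, res) j = (c - pvP data j, res + pvTerm data j c) := by
  unfold pvStepB pvTerm pvP
  simp only []

lemma pvFoldA (data : List (List Int)) :
    ∀ (l : List Int) (t acc : Int),
      l.foldl (pvStepA data) (t, acc)
        = (t + (l.map (pvP data)).sum, acc + pvCost data l t) := by
  intro l
  induction l with
  | nil => intro t acc; simp [pvCost]
  | cons j rest ih =>
    intro t acc
    simp only [List.foldl_cons, List.map_cons, List.sum_cons, pvStepA_eq, ih, pvCost,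
      Prod.mk.injEq]
    constructor <;> ring

lemma pvFoldB (data : List (List Int)) :
    ∀ (l : List Int) (t acc : Int),
      l.reverse.foldl (pvStepB data) (t + (l.map (pvP data)).sum, acc)
        = (t, acc + pvCost data l t) := by
  intro l
  induction l with
  | nil => intro t acc; simp [pvCost]
  | cons j rest ih =>
    intro t acc
    simp only [List.reverse_cons, List.foldl_append, List.foldl_cons, List.foldl_nil,
      List.map_cons, List.sum_cons]
    have h : t + (pvP data j + (rest.map (pvP data)).sum)
        = (t + pvP data j) + (rest.map (pvP data)).sum := by ring
    rw [h, ih (t + pvP data j) acc, pvStepB_eq]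
    simp only [pvCost, Prod.mk.injEq]
    constructor <;> ring

-- ===== VERDICT (by name: the statement is the Claim_ definition above) =====
theorem calculerFonctionObjective_spec : Claim_equal_calculerFonctionObjective := by
  intro x data _ _
  unfold Spec_calculerFonctionObjective calculerFonctionObjective calculerFonctionObjective_alt
  rw [PySem.List.foldl_pyRange_zero_pyGetD' x 0 (pvStepA data) ((0 : Int), (0 : Int))]
  rw [pvFoldA data x 0 0]
  have hB := pvFoldB data x 0 0
  rw [zero_add] at hB
  simp only []
  rw [show (x.map (fun j => PySem.List.pyGetD (PySem.List.pyGetD data j []) 0 0)).sum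
        = (x.map (pvP data)).sum from rfl, hB]
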